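-- pv_equiv track=rewrite | github.com/danielroe/brainlife-ezbids | handler/ezBIDS_core/ezBIDS_core.py | correct_pe
-- ===== SOURCE A (Python) =====
-- def correct_pe(pe_direction, ornt):
--     """
--     Takes phase encoding direction and image orientation to correct
--     pe_direction if need be. This correction occurs if pe_direction
--     is in "xyz" format instead of "ijk".
--
--     Function is based on https://github.com/nipreps/fmriprep/issues/2341 and
--     code derived from Chris Markiewicz and Mathias Goncalves.
--
--     Parameters
--     ----------
--     pe_direction : string
--         Value from PhaseEncodingDirection in acquisition json file generated
--         by dcm2niix
--     ornt: string
--         Value of "".join(nib.aff2axcodes(nii_img.affine)), where "nii_img" is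
--         is the acquisition NIFTI file generated by dcm2niix
--
--     Returns
--     -------
--     proper_pe_direction: string
--         pe_direction, in "ijk" format
--     """
--     # axes = (("R", "L"), ("A", "P"), ("S", "I"))
--     proper_ax_idcs = {"i": 0, "j": 1, "k": 2}
--
--     # pe_direction is ijk (no correction necessary)
--     if any(x in pe_direction for x in ["i", "i-", "j", "j-", "k", "k"]):
--         proper_pe_direction = pe_direction
--
--     # pe_direction xyz (correction required)
--     else:
--         improper_ax_idcs = {"x": 0, "y": 1, "z": 2}
--         axcode = ornt[improper_ax_idcs[pe_direction[0]]]
--         axcode_index = improper_ax_idcs[pe_direction[0]]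
--         inv = pe_direction[1:] == "-"
--
--         if pe_direction[0] == "x":
--             if "L" in axcode:
--                 inv = not inv
--         elif pe_direction[0] == "y":
--             if "P" in axcode:
--                 inv = not inv
--         elif pe_direction[0] == "z":
--             if "I" in axcode:
--                 inv = not inv
--         else:
--             ValueError("pe_direction does not contain letter i, j, k, x, y, or z")
--
--         if inv:
--             polarity = "-"
--         else:
--             polarity = ""
--
--         proper_pe_direction = [key for key, value in proper_ax_idcs.items()
--                                if value == axcode_index][0] + polarity
--
--     return proper_pe_direction
-- ===== SOURCE B (Python) =====
-- def correct_pe(pe_direction, ornt):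
--     # Already ijk: return unchanged.
--     if any(c in 'ijk' for c in pe_direction):
--         return pe_direction
--     # Stage 1: build the complete xyz->ijk translation table for this orientation.
--     table = {}
--     for idx in range(3):
--         flipped = ornt[idx:idx + 1] == 'LPI'[idx]
--         for sign in ('', '-'):
--             out_sign = '-' if (sign == '-') != flipped else ''
--             table['xyz'[idx] + sign] = 'ijk'[idx] + out_sign
--     # Stage 2: normalise the code (anything but a sole '-' suffix means no sign) and look it up.
--     key = pe_direction[0] + ('-' if pe_direction[1:] == '-' else '')
--     return table[key]
-- ===== Notes on version B (the rewrite author's own statement) =====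
-- stated objective: alternative
-- what changed: Instead of branching on the specific axis, B first builds the complete 6-entry xyz->ijk translation table for the given orientation (a loop over the three axes and two signs, using total slicing ornt[idx:idx+1]), then normalises the input code and answers with a single dictionary lookup; A's per-axis if/elif ladder, its two index dicts and its reverse list-comprehension key search are gone.
import Mathlib
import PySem

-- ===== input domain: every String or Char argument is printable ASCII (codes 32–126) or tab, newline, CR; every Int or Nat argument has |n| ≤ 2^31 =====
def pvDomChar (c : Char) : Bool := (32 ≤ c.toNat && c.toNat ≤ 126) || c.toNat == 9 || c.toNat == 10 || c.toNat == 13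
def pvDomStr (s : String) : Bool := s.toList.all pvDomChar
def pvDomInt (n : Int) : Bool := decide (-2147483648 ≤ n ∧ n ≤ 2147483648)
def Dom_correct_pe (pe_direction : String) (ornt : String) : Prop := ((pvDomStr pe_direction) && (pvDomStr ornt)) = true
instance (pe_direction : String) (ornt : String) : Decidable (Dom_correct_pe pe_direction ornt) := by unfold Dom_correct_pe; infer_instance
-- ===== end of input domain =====

-- B builds the full xyz->ijk translation table for the given orientation first and
-- then answers with one lookup, replacing A's per-axis branch ladder; return values proved equal on Pre_.

-- ===== PORT A =====
def correct_pe (pe_direction : String) (ornt : String) : String :=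
  let pe := pe_direction.toList
  let o := ornt.toList
  let proper_ax_idcs : PySem.Dict String Int :=
    PySem.Dict.ofList [("i", 0), ("j", 1), ("k", 2)]
  if ["i", "i-", "j", "j-", "k", "k"].any (fun x => PySem.Chars.isIn x.toList pe) then
    pe_direction
  else
    let improper_ax_idcs : PySem.Dict Char Int :=
      PySem.Dict.ofList [('x', 0), ('y', 1), ('z', 2)]
    let c0 : Char := (PySem.List.pyGet? pe 0).getD ' '        -- pe[0]; IndexError excluded by Pre_
    let axcode_index : Int := improper_ax_idcs.getD c0 0      -- KeyError excluded by Pre_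
    let axcode : Char := (PySem.List.pyGet? o axcode_index).getD ' '  -- ornt[idx]; IndexError excluded by Pre_
    let inv0 : Bool := PySem.Chars.slice pe (some 1) none == ['-']
    let inv : Bool :=
      if c0 = 'x' then (if PySem.Chars.isIn ['L'] [axcode] then !inv0 else inv0)
      else if c0 = 'y' then (if PySem.Chars.isIn ['P'] [axcode] then !inv0 else inv0)
      else if c0 = 'z' then (if PySem.Chars.isIn ['I'] [axcode] then !inv0 else inv0)
      else inv0                                               -- Python's bare ValueError(...) does not raise
    let polarity : List Char := if inv then ['-'] else []
    let keys : List String :=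
      ((proper_ax_idcs.items.filter (fun p => p.2 == axcode_index)).map (fun p => p.1))
    let key : String := (PySem.List.pyGet? keys 0).getD ""    -- [...][0]
    String.ofList (key.toList ++ polarity)

-- ===== PORT B =====
def correct_pe_alt (pe_direction : String) (ornt : String) : String :=
  let pe := pe_direction.toList
  if pe.any (fun c => PySem.Chars.isIn [c] ['i', 'j', 'k']) then pe_direction
  else
    -- stage 1: the complete 6-entry translation table for this ornt
    let table : PySem.Dict String String :=
      (PySem.List.pyRange 0 3 1).foldl (fun t idx =>
        let flipped : Bool :=
          PySem.Chars.slice ornt.toList (some idx) (some (idx + 1)) ==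
            [(PySem.List.pyGet? ['L', 'P', 'I'] idx).getD ' ']
        ["", "-"].foldl (fun t sign =>
          let out_sign : List Char := if (sign == "-") != flipped then ['-'] else []
          t.insert
            (String.ofList ((PySem.List.pyGet? ['x', 'y', 'z'] idx).getD ' ' :: sign.toList))
            (String.ofList ((PySem.List.pyGet? ['i', 'j', 'k'] idx).getD ' ' :: out_sign))) t)
        PySem.Dict.empty
    -- stage 2: normalised key, single lookup
    let key : String :=
      String.ofList ((PySem.List.pyGet? pe 0).getD ' ' ::
        (if PySem.Chars.slice pe (some 1) none == ['-'] then ['-'] else []))  -- pe[0]; IndexError excluded by Pre_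
    (table.get? key).getD ""                                   -- KeyError excluded by Pre_

-- ===== PRECONDITION & SPEC =====
-- Pre_ excludes exactly the inputs where A raises: first char not in ijkxyz with no
-- i/j/k anywhere (KeyError), empty pe_direction (IndexError), or ornt shorter than
-- the looked-up axis index (IndexError).
def Pre_correct_pe (pe_direction : String) (ornt : String) : Prop :=
  ('i' ∈ pe_direction.toList ∨ 'j' ∈ pe_direction.toList ∨ 'k' ∈ pe_direction.toList) ∨
  ((pe_direction.toList[0]? = some 'x' ∧ 1 ≤ ornt.toList.length) ∨
   (pe_direction.toList[0]? = some 'y' ∧ 2 ≤ ornt.toList.length) ∨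
   (pe_direction.toList[0]? = some 'z' ∧ 3 ≤ ornt.toList.length))
instance (pe_direction : String) (ornt : String) : Decidable (Pre_correct_pe pe_direction ornt) := by
  unfold Pre_correct_pe; infer_instance

def pvWitness_correct_pe : String × String := ("y-", "RAS")

def Spec_correct_pe (pe_direction : String) (ornt : String) (out : String) : Prop := out = correct_pe_alt pe_direction ornt
instance (pe_direction : String) (ornt : String) (out : String) : Decidable (Spec_correct_pe pe_direction ornt out) := by unfold Spec_correct_pe; infer_instance

-- ===== CLAIM (what is proved, stated in full; the proofs are below) =====
def Claim_equal_correct_pe : Prop := ∀ (pe_direction : String) (ornt : String), Dom_correct_pe pe_direction ornt → Pre_correct_pe pe_direction ornt → Spec_correct_pe pe_direction ornt (correct_pe pe_direction ornt)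

-- ===== LEMMAS AND PROOFS =====

-- a single char is an infix exactly when it is a member
lemma singleton_infix_iff {a : Char} {l : List Char} : [a] <:+: l ↔ a ∈ l := by
  constructor
  · intro h; exact h.sublist.mem (by simp)
  · intro h
    obtain ⟨s, t, h1, -⟩ := List.eq_append_cons_of_mem h
    exact ⟨s, t, by rw [h1]; simp⟩

lemma isIn_single (a : Char) (pe : List Char) : PySem.Chars.isIn [a] pe = pe.contains a := by
  rcases h : PySem.Chars.isIn [a] pe
  · have hm := (PySem.Chars.isIn_eq_false_iff _ _).mp h
    rw [singleton_infix_iff] at hm; simp [hm]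
  · have hm := (PySem.Chars.isIn_iff_infix _ _).mp h
    rw [singleton_infix_iff] at hm; simp [hm]

lemma isIn_pair_eq_false {a : Char} {pe : List Char} (h : a ∉ pe) :
    PySem.Chars.isIn [a, '-'] pe = false := by
  rw [PySem.Chars.isIn_eq_false_iff]
  intro hinf
  exact h (hinf.sublist.mem (by simp))

-- A's substring test over ["i","i-","j","j-","k","k"] equals B's per-char substring test over "ijk"
lemma cond_eq (pe : List Char) :
    (["i", "i-", "j", "j-", "k", "k"].any (fun x => PySem.Chars.isIn x.toList pe)) =
    (pe.any (fun c => PySem.Chars.isIn [c] ['i', 'j', 'k'])) := by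
  simp only [List.any_cons, List.any_nil, Bool.or_false,
    show ("i" : String).toList = ['i'] from rfl, show ("j" : String).toList = ['j'] from rfl,
    show ("k" : String).toList = ['k'] from rfl, show ("i-" : String).toList = ['i', '-'] from rfl,
    show ("j-" : String).toList = ['j', '-'] from rfl]
  by_cases hi : 'i' ∈ pe <;> by_cases hj : 'j' ∈ pe <;> by_cases hk : 'k' ∈ pe
  all_goals
    first
      | (simp only [isIn_single, List.contains_eq_mem, hi, hj, hk,
           decide_true, Bool.true_or, Bool.or_true, Bool.true_eq, List.any_eq_true]
         first
           | exact ⟨'i', hi, by decide⟩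
           | exact ⟨'j', hj, by decide⟩
           | exact ⟨'k', hk, by decide⟩)
      | (rw [isIn_pair_eq_false hi, isIn_pair_eq_false hj]
         simp only [isIn_single, List.contains_eq_mem, hi, hj, hk, decide_false, Bool.or_self]
         symm
         rw [List.any_eq_false]
         intro c hc hcc
         rcases (by simpa using hcc : c = 'i' ∨ c = 'j' ∨ c = 'k') with rfl | rfl | rfl
         exacts [hi hc, hj hc, hk hc])

-- slice xs [i:i+1] is the singleton of xs[i] when i < length (Nat i)
lemma slice_one (xs : List Char) (i : Nat) (h : i < xs.length) :
    PySem.Chars.slice xs (some (i : Int)) (some ((i : Int) + 1)) = [xs[i]] := by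
  have h1 : ((i : Int) + 1) = ((i + 1 : Nat) : Int) := by push_cast; ring
  rw [h1, show PySem.Chars.slice xs (some (i : Int)) (some ((i + 1 : Nat) : Int)) =
      PySem.List.slice xs (some (i : Int)) (some ((i + 1 : Nat) : Int)) from rfl,
    PySem.List.slice_natCast]
  simp [List.take_one, List.head?_drop, List.getElem?_eq_getElem h]

-- ===== VERDICT (by name: the statement is the Claim_ definition above) =====
theorem correct_pe_spec : Claim_equal_correct_pe := by
  intro pe ornt _ hpre
  unfold Spec_correct_pe
  simp only [correct_pe, correct_pe_alt, cond_eq]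
  by_cases hc : (pe.toList.any (fun c => PySem.Chars.isIn [c] ['i', 'j', 'k'])) = true
  · simp [hc]
  · rw [Bool.not_eq_true] at hc
    simp only [hc, Bool.false_eq_true, if_false]
    have hnot : ¬ ('i' ∈ pe.toList ∨ 'j' ∈ pe.toList ∨ 'k' ∈ pe.toList) := by
      simp only [List.any_eq_false] at hc
      rintro (h | h | h)
      · have := hc 'i' h; simp [isIn_single] at this
      · have := hc 'j' h; simp [isIn_single] at this
      · have := hc 'k' h; simp [isIn_single] at this
    have hz : PySem.List.pyGet? pe.toList 0 = pe.toList[0]? := PySem.List.pyGet?_zero _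
    have hrange : PySem.List.pyRange 0 3 1 = [0, 1, 2] := by decide
    rcases hpre with h | ⟨h0, hlen⟩ | ⟨h0, hlen⟩ | ⟨h0, hlen⟩
    · exact absurd h hnot
    · -- pe starts with 'x'
      have hs0 : PySem.List.slice ornt.toList none (some 1) = [ornt.toList[0]] := by
        have h := slice_one ornt.toList 0 (by omega); simpa using h
      have hg : PySem.List.pyGet? ornt.toList (0 : Int) = some ornt.toList[0] := by
        have := PySem.List.pyGet?_natCast (xs := ornt.toList) (n := 0)
        rw [List.getElem?_eq_getElem (by omega)] at this
        simpa using this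
      rw [hz, h0]
      simp only [hrange, List.foldl, Option.getD_some,
        show (PySem.Dict.ofList [('x', (0 : Int)), ('y', 1), ('z', 2)]).getD 'x' 0 = 0 from by decide,
        show (((PySem.Dict.ofList [("i", (0 : Int)), ("j", 1), ("k", 2)]).items.filter
            (fun p => p.2 == (0 : Int))).map (fun p => p.1)) = ["i"] from by decide,
        show (PySem.List.pyGet? ["i"] (0 : Int)).getD "" = "i" from by decide, hg]
      by_cases hb : PySem.List.slice pe.toList (some 1) none = ['-'] <;>
        by_cases hcl : ornt.toList[0] = 'L' <;>
        simp [hb, hcl, hs0, isIn_single,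
          show ('L' = ornt.toList[0]) ↔ (ornt.toList[0] = 'L') from eq_comm,
          PySem.Dict.get?, PySem.Dict.insert, PySem.Dict.empty,
          show ("" : String).toList = ([] : List Char) from rfl,
          show ("-" : String).toList = ['-'] from rfl,
          show String.ofList ['x'] = "x" from rfl, show String.ofList ['x', '-'] = "x-" from rfl,
          show String.ofList ['y'] = "y" from rfl, show String.ofList ['y', '-'] = "y-" from rfl,
          show String.ofList ['z'] = "z" from rfl, show String.ofList ['z', '-'] = "z-" from rfl,
          PySem.List.pyGet?, PySem.List.pyIdx?]
    · -- pe starts with 'y'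
      have hs1 : PySem.List.slice ornt.toList (some 1) (some 2) = [ornt.toList[1]] := by
        have h := slice_one ornt.toList 1 (by omega); norm_num at h; exact h
      have hg : PySem.List.pyGet? ornt.toList (1 : Int) = some ornt.toList[1] := by
        have := PySem.List.pyGet?_natCast (xs := ornt.toList) (n := 1)
        rw [List.getElem?_eq_getElem (by omega)] at this
        simpa using this
      rw [hz, h0]
      simp only [hrange, List.foldl, Option.getD_some,
        show (PySem.Dict.ofList [('x', (0 : Int)), ('y', 1), ('z', 2)]).getD 'y' 0 = 1 from by decide,
        show (((PySem.Dict.ofList [("i", (0 : Int)), ("j", 1), ("k", 2)]).items.filter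
            (fun p => p.2 == (1 : Int))).map (fun p => p.1)) = ["j"] from by decide,
        show (PySem.List.pyGet? ["j"] (0 : Int)).getD "" = "j" from by decide, hg]
      by_cases hb : PySem.List.slice pe.toList (some 1) none = ['-'] <;>
        by_cases hcl : ornt.toList[1] = 'P' <;>
        simp [hb, hcl, hs1, isIn_single,
          show ('P' = ornt.toList[1]) ↔ (ornt.toList[1] = 'P') from eq_comm,
          PySem.Dict.get?, PySem.Dict.insert, PySem.Dict.empty,
          show ("" : String).toList = ([] : List Char) from rfl,
          show ("-" : String).toList = ['-'] from rfl,
          show String.ofList ['x'] = "x" from rfl, show String.ofList ['x', '-'] = "x-" from rfl,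
          show String.ofList ['y'] = "y" from rfl, show String.ofList ['y', '-'] = "y-" from rfl,
          show String.ofList ['z'] = "z" from rfl, show String.ofList ['z', '-'] = "z-" from rfl,
          PySem.List.pyGet?, PySem.List.pyIdx?]
    · -- pe starts with 'z'
      have hs2 : PySem.List.slice ornt.toList (some 2) (some 3) = [ornt.toList[2]] := by
        have h := slice_one ornt.toList 2 (by omega); norm_num at h; exact h
      have hg : PySem.List.pyGet? ornt.toList (2 : Int) = some ornt.toList[2] := by
        have := PySem.List.pyGet?_natCast (xs := ornt.toList) (n := 2)
        rw [List.getElem?_eq_getElem (by omega)] at this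
        simpa using this
      rw [hz, h0]
      simp only [hrange, List.foldl, Option.getD_some,
        show (PySem.Dict.ofList [('x', (0 : Int)), ('y', 1), ('z', 2)]).getD 'z' 0 = 2 from by decide,
        show (((PySem.Dict.ofList [("i", (0 : Int)), ("j", 1), ("k", 2)]).items.filter
            (fun p => p.2 == (2 : Int))).map (fun p => p.1)) = ["k"] from by decide,
        show (PySem.List.pyGet? ["k"] (0 : Int)).getD "" = "k" from by decide, hg]
      by_cases hb : PySem.List.slice pe.toList (some 1) none = ['-'] <;>
        by_cases hcl : ornt.toList[2] = 'I' <;>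
        simp [hb, hcl, hs2, isIn_single,
          show ('I' = ornt.toList[2]) ↔ (ornt.toList[2] = 'I') from eq_comm,
          PySem.Dict.get?, PySem.Dict.insert, PySem.Dict.empty,
          show ("" : String).toList = ([] : List Char) from rfl,
          show ("-" : String).toList = ['-'] from rfl,
          show String.ofList ['x'] = "x" from rfl, show String.ofList ['x', '-'] = "x-" from rfl,
          show String.ofList ['y'] = "y" from rfl, show String.ofList ['y', '-'] = "y-" from rfl,
          show String.ofList ['z'] = "z" from rfl, show String.ofList ['z', '-'] = "z-" from rfl,
          PySem.List.pyGet?, PySem.List.pyIdx?]
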